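-- pv_equiv track=rewrite | github.com/ldy9037/python-algorithm | dev-matching/test3.py | solution
-- ===== SOURCE A (Python) =====
-- def check_push(table, stack, visited, x, y):
--     # 해당 지점이 물이고 방문한적이 없다면 방문 예약(push)
--     if table[x][y] == 0 and not visited[x][y]:
--         # 방문 처리 (중복 방문 예약을 방지하기 위해 미리 방문 처리)
--         visited[x][y] = True
--         stack.append((x, y))
--
--     return stack
--
-- def solution(rows, columns, lands):
--     answer = []
--
--     # DFS로 넓이를 구할 것이기 때문에 중복방문을 피하기 위해 해당 지점을 방문했는지 체크
--     visited = [] * (rows)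
--     # 배열 주소 참조를 방지하기 위해 loop로 2차원 배열 생성
--     for i in range(rows):
--         visited.append([False] * (columns))
--
--     # rows * columns 크기의 table을 생성
--     # 배열 주소 참조를 방지하기 위해 loop로 2차원 배열 생성
--     table = [] * rows
--     for i in range(rows): table.append([0] * columns)
--     # table(지도)상에 땅인 부분 1로 표시
--     for x,y in lands: table[x - 1][y - 1] = 1
--
--     # 지도의 처음 부터 탐색 시작
--     # 지도의 테두리는 바다로 구성되어 있기 때문에 테두리는 제외하고 탐색
--     for i in range(rows - 2):
--         for k in range(columns - 2):
--             # 이미 방문한 적이 있는 지점이거나 해당 지점이 땅일 경우는 그냥 다음 지점으로 넘어감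
--             if visited[i + 1][k + 1] or table[i + 1][k + 1] == 1: continue
--
--             # 위 조건에 해당하지 않는 다면 DFS 시작 (해당 지점이 물이고 첫 방문)
--             # DFS를 위해 stack 생성
--             stack = []
--             # 해당 지점부터 시작
--             stack.append((i + 1, k + 1))
--
--             # 탐색할 호수 넓이 초기화
--             area = 0
--             # 지금 DFS로 탐색하고 있는 영역이 호수인지 여부를 담고 있는 변수 선언
--             isLake = True
--             while stack:
--                 # 지점 방문 (row, col)
--                 x, y = stack.pop()
--                 # 방문했음을 표시
--                 visited[x][y] = True
--                 # 호수 넓이 + 1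
--                 area += 1
--
--                 # 호수가 테두리와 맞닿아 있다면
--                 if x == 0 or y == 0 or x == rows - 1 or y == columns - 1:
--                     # 이 영역은 호수가 아님 (바다임)
--                     isLake = False
--                 else:
--                     # 해당 지점을 기준으로 동서남북 체크 후 방문 예약
--                     stack = check_push(table, stack, visited, x + 1, y)
--                     stack = check_push(table, stack, visited, x, y + 1)
--                     stack = check_push(table, stack, visited, x - 1, y)
--                     stack = check_push(table, stack, visited, x, y - 1)
--
--             # 탐색 결과 이 영역이 호수라면 넓이를 저장
--             if isLake: answer.append(area)
--
--     # 저장된 넓이가 존재하면 최소/최대값 return 만약에 저장된 넓이가 없다면 최소/최대 모두 -1로 return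
--     return [min(answer), max(answer)] if answer else [-1, -1]
-- ===== SOURCE B (Python) =====
-- def solution(rows, columns, lands):
--     table = [[0] * columns for _ in range(rows)]
--     for x, y in lands:
--         table[x - 1][y - 1] = 1
--
--     visited = set()
--     sizes = []
--     for i in range(1, rows - 1):
--         for k in range(1, columns - 1):
--             if (i, k) in visited or table[i][k] == 1:
--                 continue
--             # breadth-first flood: growing queue with a head index, mark on enqueue
--             queue = [(i, k)]
--             visited.add((i, k))
--             head = 0
--             area = 0
--             lake = True
--             while head < len(queue):
--                 x, y = queue[head]
--                 head += 1
--                 area += 1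
--                 if x == 0 or y == 0 or x == rows - 1 or y == columns - 1:
--                     lake = False
--                 else:
--                     for n in ((x + 1, y), (x, y + 1), (x - 1, y), (x, y - 1)):
--                         if table[n[0]][n[1]] == 0 and n not in visited:
--                             visited.add(n)
--                             queue.append(n)
--             if lake:
--                 sizes.append(area)
--
--     return [min(sizes), max(sizes)] if sizes else [-1, -1]
-- ===== Notes on version B (the rewrite author's own statement) =====
-- stated objective: alternative
-- what changed: Replaces A's depth-first stack flood fill (check_push helper, mark-on-push neighbours, mark-on-pop start, LIFO pops) with a breadth-first fill: a growing queue scanned by a head index (nothing is ever popped), the start cell marked on enqueue like every other cell, neighbours generated inline, and the visited matrix replaced by a coordinate set; the results agree because a component's area, border contact and final visited set do not depend on the traversal order.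
import Mathlib
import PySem

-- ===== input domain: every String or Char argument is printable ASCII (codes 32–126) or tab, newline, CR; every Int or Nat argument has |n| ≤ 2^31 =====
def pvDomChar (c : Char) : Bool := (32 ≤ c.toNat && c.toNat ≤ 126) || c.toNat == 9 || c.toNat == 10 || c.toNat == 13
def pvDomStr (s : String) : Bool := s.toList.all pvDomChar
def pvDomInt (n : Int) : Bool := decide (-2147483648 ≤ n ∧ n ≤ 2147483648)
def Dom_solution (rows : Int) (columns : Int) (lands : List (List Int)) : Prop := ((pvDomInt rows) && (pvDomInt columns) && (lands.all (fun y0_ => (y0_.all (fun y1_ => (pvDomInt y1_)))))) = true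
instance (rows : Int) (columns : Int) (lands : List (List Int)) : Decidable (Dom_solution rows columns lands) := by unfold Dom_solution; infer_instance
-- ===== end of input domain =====

-- B replaces A's depth-first stack flood fill by a breadth-first fill (head-indexed growing
-- queue, mark on enqueue including the start, coordinate set instead of a visited matrix);
-- the return values are proved identical on Pre_.

-- shared primitives: Python 2-D read t[x][y] and the literal line `table[x - 1][y - 1] = 1`
-- (total via pyGetD/pySetD; exact wherever Python does not raise — Pre_ excludes the raising inputs)
def pvCell (t : List (List Int)) (x y : Int) : Int :=
  PySem.List.pyGetD (PySem.List.pyGetD t x []) y 0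

def markLands (t0 : List (List Int)) (lands : List (List Int)) : List (List Int) :=
  lands.foldl (fun t l =>
    PySem.List.pySetD t (PySem.List.pyGetD l 0 0 - 1)
      (PySem.List.pySetD (PySem.List.pyGetD t (PySem.List.pyGetD l 0 0 - 1) [])
        (PySem.List.pyGetD l 1 0 - 1) 1)) t0

-- ===== PORT A =====
-- visited[x][y] read / write (in A every queried index is a grid coordinate, hence nonnegative in range)
def vGet (v : List (List Bool)) (x y : Int) : Bool :=
  PySem.List.pyGetD (PySem.List.pyGetD v x []) y false

def vSet (v : List (List Bool)) (x y : Int) : List (List Bool) :=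
  PySem.List.pySetD v x (PySem.List.pySetD (PySem.List.pyGetD v x []) y true)

-- stack is mirrored: Python's list END (push/pop side) is the Lean list HEAD
def check_push (table : List (List Int)) (stack : List (Int × Int)) (visited : List (List Bool))
    (x y : Int) : List (Int × Int) × List (List Bool) :=
  if pvCell table x y == 0 && !(vGet visited x y) then
    ((x, y) :: stack, vSet visited x y)
  else (stack, visited)

-- the `while stack:` loop; fuel only makes it total (it is never exhausted for the fuel A's caller passes)
def dfsA (table : List (List Int)) (rows columns : Int) :
    Nat → List (Int × Int) → List (List Bool) → Int → Bool → List (List Bool) × Int × Bool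
  | 0, _, visited, area, isLake => (visited, area, isLake)
  | _ + 1, [], visited, area, isLake => (visited, area, isLake)
  | fuel + 1, (x, y) :: rest, visited, area, isLake =>
      let visited := vSet visited x y
      let area := area + 1
      if x == 0 || y == 0 || x == rows - 1 || y == columns - 1 then
        dfsA table rows columns fuel rest visited area false
      else
        let p1 := check_push table rest visited (x + 1) y
        let p2 := check_push table p1.1 p1.2 x (y + 1)
        let p3 := check_push table p2.1 p2.2 (x - 1) y
        let p4 := check_push table p3.1 p3.2 x (y - 1)
        dfsA table rows columns fuel p4.1 p4.2 area isLake

def solution (rows : Int) (columns : Int) (lands : List (List Int)) : List Int :=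
  let visited0 : List (List Bool) :=
    (PySem.List.pyRange 0 rows 1).foldl (fun v _ => v ++ [List.replicate columns.toNat false]) []
  let table0 : List (List Int) :=
    (PySem.List.pyRange 0 rows 1).foldl (fun t _ => t ++ [List.replicate columns.toNat 0]) []
  let table := markLands table0 lands
  let fuel := rows.toNat * columns.toNat + 1
  let res := (PySem.List.pyRange 0 (rows - 2) 1).foldl
    (fun (acc : List (List Bool) × List Int) i =>
      (PySem.List.pyRange 0 (columns - 2) 1).foldl
        (fun (acc : List (List Bool) × List Int) k =>
          if vGet acc.1 (i + 1) (k + 1) || pvCell table (i + 1) (k + 1) == 1 then acc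
          else
            let r := dfsA table rows columns fuel [(i + 1, k + 1)] acc.1 0 true
            if r.2.2 then (r.1, acc.2 ++ [r.2.1]) else (r.1, acc.2)) acc)
    (visited0, [])
  if res.2.isEmpty then [-1, -1]
  else [(PySem.List.min? res.2 (fun v => v)).getD 0, (PySem.List.max? res.2 (fun v => v)).getD 0]

-- ===== PORT B =====
-- breadth-first fill: the queue only grows, `head` walks over it; cells are marked on enqueue
def bfsB (table : List (List Int)) (rows columns : Int) :
    Nat → List (Int × Int) → Nat → PySem.Set (Int × Int) → Int → Bool →
      PySem.Set (Int × Int) × Int × Bool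
  | 0, _, _, vs, area, lake => (vs, area, lake)
  | fuel + 1, queue, head, vs, area, lake =>
      if h : head < queue.length then
        let c := queue[head]
        let area := area + 1
        if c.1 == 0 || c.2 == 0 || c.1 == rows - 1 || c.2 == columns - 1 then
          bfsB table rows columns fuel queue (head + 1) vs area false
        else
          let st := [(c.1 + 1, c.2), (c.1, c.2 + 1), (c.1 - 1, c.2), (c.1, c.2 - 1)].foldl
            (fun (st : List (Int × Int) × PySem.Set (Int × Int)) n =>
              if pvCell table n.1 n.2 == 0 && !(PySem.Set.contains st.2 n) then
                (st.1 ++ [n], PySem.Set.add st.2 n)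
              else st) (queue, vs)
          bfsB table rows columns fuel st.1 (head + 1) st.2 area lake
      else (vs, area, lake)

def solution_alt (rows : Int) (columns : Int) (lands : List (List Int)) : List Int :=
  let table := markLands
    ((PySem.List.pyRange 0 rows 1).map (fun _ => List.replicate columns.toNat 0)) lands
  let fuel := rows.toNat * columns.toNat + 1
  let res := (PySem.List.pyRange 1 (rows - 1) 1).foldl
    (fun (acc : PySem.Set (Int × Int) × List Int) i =>
      (PySem.List.pyRange 1 (columns - 1) 1).foldl
        (fun (acc : PySem.Set (Int × Int) × List Int) k =>
          if PySem.Set.contains acc.1 (i, k) || pvCell table i k == 1 then acc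
          else
            let r := bfsB table rows columns fuel [(i, k)] 0 (PySem.Set.add acc.1 (i, k)) 0 true
            if r.2.2 then (r.1, acc.2 ++ [r.2.1]) else (r.1, acc.2)) acc)
    (PySem.Set.empty, [])
  if res.2.isEmpty then [-1, -1]
  else [(PySem.List.min? res.2 (fun v => v)).getD 0, (PySem.List.max? res.2 (fun v => v)).getD 0]

-- ===== PRECONDITION & SPEC =====
-- Pre_ excludes exactly the inputs where A raises: an element of lands that is not a pair
-- (ValueError on unpacking) or a 1-based coordinate outside Python's index range for the
-- rows*columns grid (IndexError on table[x-1][y-1] = 1). B raises on exactly the same inputs.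
def Pre_solution (rows : Int) (columns : Int) (lands : List (List Int)) : Prop :=
  ∀ l ∈ lands, l.length = 2 ∧
    1 - rows ≤ PySem.List.pyGetD l 0 0 ∧ PySem.List.pyGetD l 0 0 ≤ rows ∧
    1 - columns ≤ PySem.List.pyGetD l 1 0 ∧ PySem.List.pyGetD l 1 0 ≤ columns
instance (rows : Int) (columns : Int) (lands : List (List Int)) : Decidable (Pre_solution rows columns lands) := by unfold Pre_solution; infer_instance

def pvWitness_solution : Int × Int × List (List Int) := (4, 4, [[1, 1], [4, 2]])

def Spec_solution (rows : Int) (columns : Int) (lands : List (List Int)) (out : List Int) : Prop := out = solution_alt rows columns lands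
instance (rows : Int) (columns : Int) (lands : List (List Int)) (out : List Int) : Decidable (Spec_solution rows columns lands out) := by unfold Spec_solution; infer_instance

-- ===== CLAIM (what is proved, stated in full; the proofs are below) =====
def Claim_equal_solution : Prop := ∀ (rows : Int) (columns : Int) (lands : List (List Int)), Dom_solution rows columns lands → Pre_solution rows columns lands → Spec_solution rows columns lands (solution rows columns lands)

-- ===== LEMMAS AND PROOFS =====

-- grid geometry
def pvAdj (c : Int × Int) : List (Int × Int) :=
  [(c.1 + 1, c.2), (c.1, c.2 + 1), (c.1 - 1, c.2), (c.1, c.2 - 1)]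

abbrev pvInt (rows columns : Int) (c : Int × Int) : Prop :=
  0 < c.1 ∧ c.1 < rows - 1 ∧ 0 < c.2 ∧ c.2 < columns - 1

abbrev pvInR (rows columns : Int) (c : Int × Int) : Prop :=
  0 ≤ c.1 ∧ c.1 < rows ∧ 0 ≤ c.2 ∧ c.2 < columns

-- the region a flood started at s explores: s itself, plus water cells reached from interior
-- cells of the region, never re-entering the previously visited set V0
inductive pvReach (t : List (List Int)) (rows columns : Int) (V0 : Finset (Int × Int))
    (s : Int × Int) : (Int × Int) → Prop
  | base : pvReach t rows columns V0 s s
  | step {c n : Int × Int} : pvReach t rows columns V0 s c → pvInt rows columns c →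
      n ∈ pvAdj c → pvCell t n.1 n.2 = 0 → n ∉ V0 → pvReach t rows columns V0 s n

noncomputable def pvGrid (rows columns : Int) : Finset (Int × Int) :=
  Finset.Icc 0 (rows - 1) ×ˢ Finset.Icc 0 (columns - 1)

@[reducible] noncomputable def pvReachDec (t : List (List Int)) (rows columns : Int)
    (V0 : Finset (Int × Int)) (s : Int × Int) :
    DecidablePred (fun c => pvReach t rows columns V0 s c) :=
  fun _ => Classical.propDecidable _

noncomputable def pvCset (t : List (List Int)) (rows columns : Int) (V0 : Finset (Int × Int))
    (s : Int × Int) : Finset (Int × Int) :=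
  @Finset.filter _ (fun c => pvReach t rows columns V0 s c)
    (pvReachDec t rows columns V0 s) (pvGrid rows columns)

-- couplings between each port's visited structure and a finite set of grid cells
def pvShape (rows columns : Int) (v : List (List Bool)) : Prop :=
  v.length = rows.toNat ∧ ∀ r ∈ v, r.length = columns.toNat

def coupleA (rows columns : Int) (vm : List (List Bool)) (V : Finset (Int × Int)) : Prop :=
  pvShape rows columns vm ∧
  (∀ c : Int × Int, pvInR rows columns c → (vGet vm c.1 c.2 = true ↔ c ∈ V)) ∧
  (∀ c ∈ V, pvInR rows columns c)

def coupleB (rows columns : Int) (vs : PySem.Set (Int × Int)) (V : Finset (Int × Int)) : Prop :=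
  (∀ c : Int × Int, c ∈ vs ↔ c ∈ V) ∧ (∀ c ∈ V, pvInR rows columns c)

theorem mem_pvGrid (rows columns : Int) (c : Int × Int) :
    c ∈ pvGrid rows columns ↔ pvInR rows columns c := by
  simp [pvGrid, Finset.mem_product, pvInR]
  omega

theorem pvGrid_card (rows columns : Int) :
    (pvGrid rows columns).card = rows.toNat * columns.toNat := by
  simp [pvGrid, Int.card_Icc]

theorem pvAdj_inR (rows columns : Int) (c n : Int × Int) (hc : pvInt rows columns c)
    (hn : n ∈ pvAdj c) : pvInR rows columns n := by
  simp [pvAdj] at hn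
  obtain ⟨h1, h2, h3, h4⟩ := hc
  rcases hn with h | h | h | h <;> subst h <;> exact ⟨by omega, by omega, by omega, by omega⟩

theorem pvReach_inR (t : List (List Int)) (rows columns : Int) (V0 : Finset (Int × Int))
    (s : Int × Int) (hs : pvInR rows columns s) (c : Int × Int)
    (h : pvReach t rows columns V0 s c) : pvInR rows columns c := by
  induction h with
  | base => exact hs
  | step _ hint hadj _ _ _ => exact pvAdj_inR rows columns _ _ hint hadj

theorem mem_pvCset (t : List (List Int)) (rows columns : Int) (V0 : Finset (Int × Int))
    (s : Int × Int) (hs : pvInR rows columns s) (c : Int × Int) :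
    c ∈ pvCset t rows columns V0 s ↔ pvReach t rows columns V0 s c := by
  unfold pvCset
  rw [@Finset.mem_filter _ _ (pvReachDec t rows columns V0 s), mem_pvGrid]
  exact ⟨fun h => h.2, fun h => ⟨pvReach_inR t rows columns V0 s hs c h, h⟩⟩

theorem pvCset_card_le (t : List (List Int)) (rows columns : Int) (V0 : Finset (Int × Int))
    (s : Int × Int) : (pvCset t rows columns V0 s).card ≤ rows.toNat * columns.toNat := by
  calc (pvCset t rows columns V0 s).card ≤ (pvGrid rows columns).card :=
        @Finset.card_filter_le _ _ _ (pvReachDec t rows columns V0 s)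
    _ = _ := pvGrid_card rows columns

-- a set containing s and closed under one flood step absorbs the whole region
theorem pvReach_subset (t : List (List Int)) (rows columns : Int) (V0 : Finset (Int × Int))
    (s : Int × Int) (D : Finset (Int × Int)) (hsD : s ∈ D)
    (hcl : ∀ c ∈ D, pvInt rows columns c →
      ∀ n ∈ pvAdj c, pvCell t n.1 n.2 = 0 → n ∈ V0 ∪ D) :
    ∀ c, pvReach t rows columns V0 s c → c ∈ D := by
  intro c h
  induction h with
  | base => exact hsD
  | step _ hint hadj hw hnV ih =>
      have := hcl _ ih hint _ hadj hw
      rcases Finset.mem_union.mp this with h | h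
      · exact absurd h hnV
      · exact h


theorem vGet_repl (rows columns : Int) (x y : Int) (hx0 : 0 ≤ x) (hx : x < rows) (hy0 : 0 ≤ y) (hy : y < columns) :
    vGet (List.replicate rows.toNat (List.replicate columns.toNat false)) x y = false := by
  unfold vGet
  rw [PySem.List.pyGetD_eq_getElem _ _ hx0 (by simp; omega)]
  simp only [List.getElem_replicate]
  rw [PySem.List.pyGetD_eq_getElem _ _ hy0 (by simp; omega)]
  simp

theorem pvShape_vSet (rows columns : Int) (vm : List (List Bool)) (x y : Int)
    (hx0 : 0 ≤ x) (hx : x < rows) (hy0 : 0 ≤ y)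
    (hs : pvShape rows columns vm) : pvShape rows columns (vSet vm x y) := by
  obtain ⟨h1, h2⟩ := hs
  unfold vSet
  constructor
  · rw [PySem.List.length_pySetD]; exact h1
  · intro r hr
    rw [PySem.List.pySetD_of_nonneg _ _ hx0] at hr
    rcases List.mem_or_eq_of_mem_set hr with h | h
    · exact h2 _ h
    · subst h
      rw [PySem.List.pySetD_of_nonneg _ _ hy0, List.length_set]
      rw [PySem.List.pyGetD_eq_getElem _ _ hx0 (by omega)]
      exact h2 _ (List.getElem_mem _)

theorem vGet_vSet (rows columns : Int) (vm : List (List Bool)) (x y x' y' : Int)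
    (hs : pvShape rows columns vm)
    (hx0 : 0 ≤ x) (hx : x < rows) (hy0 : 0 ≤ y) (hy : y < columns)
    (hx0' : 0 ≤ x') (hx' : x' < rows) (hy0' : 0 ≤ y') (hy' : y' < columns) :
    vGet (vSet vm x y) x' y' = if x' = x ∧ y' = y then true else vGet vm x' y' := by
  obtain ⟨h1, h2⟩ := hs
  have hxl : x.toNat < vm.length := by omega
  have hrow : (PySem.List.pyGetD vm x []).length = columns.toNat := by
    rw [PySem.List.pyGetD_eq_getElem _ _ hx0 (by omega)]
    exact h2 _ (List.getElem_mem _)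
  unfold vGet vSet
  rw [PySem.List.pySetD_of_nonneg _ _ hx0]
  by_cases hxx : x' = x
  · subst hxx
    rw [PySem.List.pyGetD_eq_getElem _ _ hx0 (by simp; omega)]
    rw [List.getElem_set_self (by simp; omega)]
    rw [PySem.List.pySetD_of_nonneg _ _ hy0]
    by_cases hyy : y' = y
    · subst hyy
      rw [PySem.List.pyGetD_eq_getElem _ _ hy0 (by simp; omega)]
      simp [List.getElem_set_self]
    · rw [PySem.List.pyGetD_eq_getElem _ _ hy0' (by simp; omega)]
      rw [List.getElem_set_ne (by omega) (by simp; omega)]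
      rw [PySem.List.pyGetD_eq_getElem _ _ hy0' (by omega)]
      simp [hyy]
  · rw [PySem.List.pyGetD_eq_getElem _ _ hx0' (by simp; omega)]
    rw [List.getElem_set_ne (by omega) (by simp; omega)]
    rw [PySem.List.pyGetD_eq_getElem _ _ hx0' (by omega)]
    simp [hxx]

-- read the visited structure as a membership test in the coupled set
theorem coupleA_get (rows columns : Int) (vm : List (List Bool)) (V : Finset (Int × Int))
    (c : Int × Int) (h : coupleA rows columns vm V) (hc : pvInR rows columns c) :
    vGet vm c.1 c.2 = decide (c ∈ V) := by
  obtain ⟨_, hmem, _⟩ := h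
  by_cases hm : c ∈ V
  · simp [hm, (hmem c hc).mpr hm]
  · simp only [hm, decide_false]
    cases hvg : vGet vm c.1 c.2
    · rfl
    · exact absurd ((hmem c hc).mp hvg) hm

theorem coupleB_get (rows columns : Int) (vs : PySem.Set (Int × Int)) (V : Finset (Int × Int))
    (c : Int × Int) (h : coupleB rows columns vs V) :
    PySem.Set.contains vs c = decide (c ∈ V) := by
  obtain ⟨hmem, _⟩ := h
  by_cases hm : c ∈ V
  · have h1 : c ∈ vs := (hmem c).mpr hm
    simp [hm]
    exact h1
  · simp only [hm, decide_false]
    cases hc : PySem.Set.contains vs c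
    · rfl
    · exact absurd ((hmem c).mp ((PySem.Set.contains_iff vs c).mp hc)) hm

theorem coupleA_insert (rows columns : Int) (vm : List (List Bool)) (V : Finset (Int × Int))
    (c : Int × Int) (h : coupleA rows columns vm V) (hc : pvInR rows columns c) :
    coupleA rows columns (vSet vm c.1 c.2) (insert c V) := by
  obtain ⟨hs, hmem, hsub⟩ := h
  obtain ⟨h1, h2, h3, h4⟩ := hc
  refine ⟨pvShape_vSet _ _ _ _ _ h1 h2 h3 hs, ?_, ?_⟩
  · intro q hq
    obtain ⟨q1, q2, q3, q4⟩ := hq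
    rw [vGet_vSet rows columns vm c.1 c.2 q.1 q.2 hs h1 h2 h3 h4 q1 q2 q3 q4]
    rw [Finset.mem_insert]
    by_cases he : q.1 = c.1 ∧ q.2 = c.2
    · have : q = c := Prod.ext he.1 he.2
      subst this; simp
    · have hqc : q ≠ c := by intro hh; subst hh; exact he ⟨rfl, rfl⟩
      simp only [if_neg he]
      rw [hmem q ⟨q1, q2, q3, q4⟩]
      simp [hqc]
  · intro q hq
    rcases Finset.mem_insert.mp hq with h | h
    · subst h; exact ⟨h1, h2, h3, h4⟩
    · exact hsub q h

theorem coupleA_set_mem (rows columns : Int) (vm : List (List Bool)) (V : Finset (Int × Int))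
    (c : Int × Int) (h : coupleA rows columns vm V) (hc : pvInR rows columns c) (hm : c ∈ V) :
    coupleA rows columns (vSet vm c.1 c.2) V := by
  have := coupleA_insert rows columns vm V c h hc
  rwa [Finset.insert_eq_self.mpr hm] at this

theorem coupleB_insert (rows columns : Int) (vs : PySem.Set (Int × Int)) (V : Finset (Int × Int))
    (c : Int × Int) (h : coupleB rows columns vs V) (hc : pvInR rows columns c) :
    coupleB rows columns (PySem.Set.add vs c) (insert c V) := by
  obtain ⟨hmem, hsub⟩ := h
  refine ⟨?_, ?_⟩
  · intro q
    rw [PySem.Set.mem_add, Finset.mem_insert, hmem q]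
    tauto
  · intro q hq
    rcases Finset.mem_insert.mp hq with h | h
    · subst h; exact hc
    · exact hsub q h

-- both ports' border test, as the negation of interiority (for in-range cells)
theorem borderTest (rows columns : Int) (c : Int × Int) (h : pvInR rows columns c) :
    (c.1 == 0 || c.2 == 0 || c.1 == rows - 1 || c.2 == columns - 1)
      = !(decide (pvInt rows columns c)) := by
  obtain ⟨h1, h2, h3, h4⟩ := h
  apply Bool.eq_iff_iff.mpr
  simp
  omega


theorem pvCset_inR (t : List (List Int)) (rows columns : Int) (V0 : Finset (Int × Int))
    (s c : Int × Int) (h : c ∈ pvCset t rows columns V0 s) : pvInR rows columns c := by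
  unfold pvCset at h
  exact (mem_pvGrid rows columns c).mp ((@Finset.mem_filter _ _ (pvReachDec t rows columns V0 s) _ _).mp h).1

-- A's sequence of check_push calls, as a fold over a neighbour list
theorem pushA_fold (t : List (List Int)) (rows columns : Int) (V0 : Finset (Int × Int))
    (s : Int × Int) (hsR : pvInR rows columns s) :
    ∀ (ns : List (Int × Int)) (stack : List (Int × Int)) (vm : List (List Bool))
      (D : Finset (Int × Int)),
    coupleA rows columns vm (V0 ∪ D) →
    D ⊆ pvCset t rows columns V0 s →
    stack.Nodup →
    (∀ c ∈ stack, c ∈ D) →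
    (∀ n ∈ ns, pvInR rows columns n) →
    (∀ n ∈ ns, pvCell t n.1 n.2 = 0 → n ∉ V0 → pvReach t rows columns V0 s n) →
    ∃ D' : Finset (Int × Int),
      coupleA rows columns
        (ns.foldl (fun st (n : Int × Int) => check_push t st.1 st.2 n.1 n.2) (stack, vm)).2
        (V0 ∪ D') ∧
      D ⊆ D' ∧ D' ⊆ pvCset t rows columns V0 s ∧
      (ns.foldl (fun st (n : Int × Int) => check_push t st.1 st.2 n.1 n.2) (stack, vm)).1.Nodup ∧
      (∀ c ∈ (ns.foldl (fun st (n : Int × Int) => check_push t st.1 st.2 n.1 n.2) (stack, vm)).1,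
        c ∈ D') ∧
      (∀ c ∈ stack,
        c ∈ (ns.foldl (fun st (n : Int × Int) => check_push t st.1 st.2 n.1 n.2) (stack, vm)).1) ∧
      (∀ c ∈ D', c ∉ D →
        c ∈ (ns.foldl (fun st (n : Int × Int) => check_push t st.1 st.2 n.1 n.2) (stack, vm)).1) ∧
      (∀ c ∈ (ns.foldl (fun st (n : Int × Int) => check_push t st.1 st.2 n.1 n.2) (stack, vm)).1,
        c ∈ stack ∨ c ∉ D) ∧
      D' \ (ns.foldl (fun st (n : Int × Int) => check_push t st.1 st.2 n.1 n.2) (stack, vm)).1.toFinset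
        = D \ stack.toFinset ∧
      (pvCset t rows columns V0 s \ D').card
          + (ns.foldl (fun st (n : Int × Int) => check_push t st.1 st.2 n.1 n.2) (stack, vm)).1.length
        = (pvCset t rows columns V0 s \ D).card + stack.length ∧
      (∀ n ∈ ns, pvCell t n.1 n.2 = 0 → n ∈ V0 ∪ D') := by
  intro ns
  induction ns with
  | nil =>
      intro stack vm D hcp hDC hnd hst _ _
      exact ⟨D, hcp, Finset.Subset.refl D, hDC, hnd, hst, fun c hc => hc, fun c hc hc' => absurd hc hc',
        fun c hc => Or.inl hc, rfl, rfl, fun n hn => absurd hn (List.not_mem_nil)⟩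
  | cons n ns ih =>
      intro stack vm D hcp hDC hnd hst hIn hRe
      have hnIn : pvInR rows columns n := hIn n List.mem_cons_self
      simp only [List.foldl_cons]
      by_cases hg : (pvCell t n.1 n.2 == 0 && !(vGet vm n.1 n.2)) = true
      · -- n gets pushed and marked
        have hw : pvCell t n.1 n.2 = 0 := by
          simp only [Bool.and_eq_true, beq_iff_eq] at hg; exact hg.1
        have hnv : n ∉ V0 ∪ D := by
          have := coupleA_get rows columns vm (V0 ∪ D) n hcp hnIn
          simp only [Bool.and_eq_true, Bool.not_eq_true'] at hg
          rw [this] at hg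
          simpa using hg.2
        have hnV0 : n ∉ V0 := fun h => hnv (Finset.mem_union_left _ h)
        have hnD : n ∉ D := fun h => hnv (Finset.mem_union_right _ h)
        have hnC : n ∈ pvCset t rows columns V0 s :=
          (mem_pvCset t rows columns V0 s hsR n).mpr (hRe n List.mem_cons_self hw hnV0)
        have hstep : check_push t stack vm n.1 n.2 = ((n.1, n.2) :: stack, vSet vm n.1 n.2) := by
          unfold check_push; rw [if_pos hg]
        have hcp1 : coupleA rows columns (vSet vm n.1 n.2) (V0 ∪ insert n D) := by
          have := coupleA_insert rows columns vm (V0 ∪ D) n hcp hnIn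
          rwa [← Finset.union_insert] at this
        have hnd1 : ((n.1, n.2) :: stack).Nodup := by
          refine List.Nodup.cons ?_ hnd
          intro h
          exact hnD (hst _ h)
        obtain ⟨D', c1, c2, c3, c4, c5, c6, c7, c8, c9, c10, c11⟩ :=
          ih ((n.1, n.2) :: stack) (vSet vm n.1 n.2) (insert n D) hcp1
            (Finset.insert_subset hnC hDC) hnd1
            (by intro c hc
                rcases List.mem_cons.mp hc with h | h
                · subst h; exact Finset.mem_insert_self _ _
                · exact Finset.mem_insert_of_mem (hst _ h))
            (fun m hm => hIn m (List.mem_cons_of_mem _ hm))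
            (fun m hm hw' hv' => hRe m (List.mem_cons_of_mem _ hm) hw' hv')
        rw [hstep]
        refine ⟨D', c1, fun c hc => c2 (Finset.mem_insert_of_mem hc), c3, c4, c5, ?_, ?_, ?_, ?_, ?_, ?_⟩
        · intro c hc; exact c6 _ (List.mem_cons_of_mem _ hc)
        · intro c hc hcD
          by_cases hcn : c = n
          · subst hcn; exact c6 _ List.mem_cons_self
          · exact c7 c hc (by simp [Finset.mem_insert, hcn, hcD])
        · intro c hc
          rcases c8 c hc with h | h
          · rcases List.mem_cons.mp h with h' | h'
            · right; rw [h']; exact hnD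
            · exact Or.inl h'
          · right; intro hcD; exact h (Finset.mem_insert_of_mem hcD)
        · rw [c9]
          ext c
          simp only [Finset.mem_sdiff, Finset.mem_insert, List.toFinset_cons, Finset.mem_insert]
          constructor
          · rintro ⟨h1 | h1, h2⟩
            · exact absurd (Or.inl h1) h2
            · exact ⟨h1, fun h => h2 (Or.inr h)⟩
          · rintro ⟨h1, h2⟩
            refine ⟨Or.inr h1, ?_⟩
            rintro (h | h)
            · subst h; exact hnD h1
            · exact h2 h
        · rw [c10]
          have : pvCset t rows columns V0 s \ insert n D
              = (pvCset t rows columns V0 s \ D).erase n := by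
            ext c
            simp only [Finset.mem_sdiff, Finset.mem_insert, Finset.mem_erase]
            tauto
          rw [this, Finset.card_erase_of_mem (Finset.mem_sdiff.mpr ⟨hnC, hnD⟩)]
          have hpos : 0 < (pvCset t rows columns V0 s \ D).card :=
            Finset.card_pos.mpr ⟨n, Finset.mem_sdiff.mpr ⟨hnC, hnD⟩⟩
          simp only [List.length_cons]
          omega
        · intro m hm hw'
          rcases List.mem_cons.mp hm with h | h
          · subst h
            exact Finset.mem_union_right _ (c2 (Finset.mem_insert_self _ _))
          · exact c11 m h hw'
      · -- n is skipped
        have hstep : check_push t stack vm n.1 n.2 = (stack, vm) := by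
          unfold check_push; rw [if_neg hg]
        obtain ⟨D', c1, c2, c3, c4, c5, c6, c7, c8, c9, c10, c11⟩ :=
          ih stack vm D hcp hDC hnd hst
            (fun m hm => hIn m (List.mem_cons_of_mem _ hm))
            (fun m hm hw' hv' => hRe m (List.mem_cons_of_mem _ hm) hw' hv')
        rw [hstep]
        refine ⟨D', c1, c2, c3, c4, c5, c6, c7, c8, c9, c10, ?_⟩
        intro m hm hw'
        rcases List.mem_cons.mp hm with h | h
        · subst h
          have hget := coupleA_get rows columns vm (V0 ∪ D) m hcp hnIn
          have : vGet vm m.1 m.2 = true := by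
            cases hvv : vGet vm m.1 m.2
            · exact absurd (by simp [hw', hvv]) hg
            · rfl
          rw [hget] at this
          have hmem : m ∈ V0 ∪ D := by simpa using this
          rcases Finset.mem_union.mp hmem with h' | h'
          · exact Finset.mem_union_left _ h'
          · exact Finset.mem_union_right _ (c2 h')
        · exact c11 m h hw'


-- B's neighbour loop: enqueue-at-end fold
theorem pushB_fold (t : List (List Int)) (rows columns : Int) (V0 : Finset (Int × Int))
    (s : Int × Int) (hsR : pvInR rows columns s) :
    ∀ (ns : List (Int × Int)) (queue : List (Int × Int)) (vs : PySem.Set (Int × Int))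
      (D : Finset (Int × Int)),
    coupleB rows columns vs (V0 ∪ D) →
    D ⊆ pvCset t rows columns V0 s →
    queue.Nodup →
    (∀ c ∈ queue, c ∈ D) →
    (∀ n ∈ ns, pvInR rows columns n) →
    (∀ n ∈ ns, pvCell t n.1 n.2 = 0 → n ∉ V0 → pvReach t rows columns V0 s n) →
    ∃ (news : List (Int × Int)) (D' : Finset (Int × Int)),
      (ns.foldl (fun (st : List (Int × Int) × PySem.Set (Int × Int)) n =>
          if pvCell t n.1 n.2 == 0 && !(PySem.Set.contains st.2 n) then
            (st.1 ++ [n], PySem.Set.add st.2 n)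
          else st) (queue, vs)).1 = queue ++ news ∧
      coupleB rows columns
        (ns.foldl (fun (st : List (Int × Int) × PySem.Set (Int × Int)) n =>
          if pvCell t n.1 n.2 == 0 && !(PySem.Set.contains st.2 n) then
            (st.1 ++ [n], PySem.Set.add st.2 n)
          else st) (queue, vs)).2 (V0 ∪ D') ∧
      D ⊆ D' ∧ D' ⊆ pvCset t rows columns V0 s ∧
      news.Nodup ∧
      (∀ c ∈ news, c ∈ D' ∧ c ∉ D) ∧
      (∀ c ∈ D', c ∉ D → c ∈ news) ∧
      (pvCset t rows columns V0 s \ D').card + news.length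
        = (pvCset t rows columns V0 s \ D).card ∧
      (∀ n ∈ ns, pvCell t n.1 n.2 = 0 → n ∈ V0 ∪ D') := by
  intro ns
  induction ns with
  | nil =>
      intro queue vs D hcp hDC _ _ _ _
      exact ⟨[], D, by simp, hcp, Finset.Subset.refl D, hDC, List.nodup_nil,
        fun c hc => absurd hc (List.not_mem_nil), fun c hc hc' => absurd hc hc', by simp,
        fun n hn => absurd hn (List.not_mem_nil)⟩
  | cons n ns ih =>
      intro queue vs D hcp hDC hnd hq hIn hRe
      have hnIn : pvInR rows columns n := hIn n List.mem_cons_self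
      simp only [List.foldl_cons]
      by_cases hg : (pvCell t n.1 n.2 == 0 && !(PySem.Set.contains vs n)) = true
      · have hw : pvCell t n.1 n.2 = 0 := by
          simp only [Bool.and_eq_true, beq_iff_eq] at hg; exact hg.1
        have hnv : n ∉ V0 ∪ D := by
          have := coupleB_get rows columns vs (V0 ∪ D) n hcp
          simp only [Bool.and_eq_true, Bool.not_eq_true'] at hg
          rw [this] at hg
          simpa using hg.2
        have hnV0 : n ∉ V0 := fun h => hnv (Finset.mem_union_left _ h)
        have hnD : n ∉ D := fun h => hnv (Finset.mem_union_right _ h)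
        have hnC : n ∈ pvCset t rows columns V0 s :=
          (mem_pvCset t rows columns V0 s hsR n).mpr (hRe n List.mem_cons_self hw hnV0)
        rw [if_pos hg]
        have hcp1 : coupleB rows columns (PySem.Set.add vs n) (V0 ∪ insert n D) := by
          have := coupleB_insert rows columns vs (V0 ∪ D) n hcp hnIn
          rwa [← Finset.union_insert] at this
        have hnd1 : (queue ++ [n]).Nodup := by
          apply List.Nodup.append hnd (List.nodup_singleton n)
          intro a ha ha'
          have ha2 : a = n := by simpa using ha'
          subst ha2
          exact hnD (hq _ ha)
        obtain ⟨news', D', c1, c2, c3, c4, c5, c6, c7, c8, c9⟩ :=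
          ih (queue ++ [n]) (PySem.Set.add vs n) (insert n D) hcp1
            (Finset.insert_subset hnC hDC) hnd1
            (by intro c hc
                rcases List.mem_append.mp hc with h | h
                · exact Finset.mem_insert_of_mem (hq _ h)
                · have h' : c = n := by simpa using h
                  subst h'; exact Finset.mem_insert_self _ _)
            (fun m hm => hIn m (List.mem_cons_of_mem _ hm))
            (fun m hm hw' hv' => hRe m (List.mem_cons_of_mem _ hm) hw' hv')
        refine ⟨n :: news', D', ?_, c2, fun c hc => c3 (Finset.mem_insert_of_mem hc), c4, ?_, ?_, ?_, ?_, ?_⟩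
        · rw [c1]; simp
        · refine List.Nodup.cons ?_ c5
          intro h
          exact ((c6 n h).2) (Finset.mem_insert_self _ _)
        · intro c hc
          rcases List.mem_cons.mp hc with h | h
          · subst h
            exact ⟨c3 (Finset.mem_insert_self _ _), hnD⟩
          · obtain ⟨h1, h2⟩ := c6 c h
            exact ⟨h1, fun h' => h2 (Finset.mem_insert_of_mem h')⟩
        · intro c hc hcD
          by_cases hcn : c = n
          · subst hcn; exact List.mem_cons_self
          · exact List.mem_cons_of_mem _ (c7 c hc (by simp [Finset.mem_insert, hcn, hcD]))
        · have hstep : pvCset t rows columns V0 s \ insert n D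
              = (pvCset t rows columns V0 s \ D).erase n := by
            ext c
            simp only [Finset.mem_sdiff, Finset.mem_insert, Finset.mem_erase]
            tauto
          rw [hstep, Finset.card_erase_of_mem (Finset.mem_sdiff.mpr ⟨hnC, hnD⟩)] at c8
          have hpos : 0 < (pvCset t rows columns V0 s \ D).card :=
            Finset.card_pos.mpr ⟨n, Finset.mem_sdiff.mpr ⟨hnC, hnD⟩⟩
          simp only [List.length_cons]
          omega
        · intro m hm hw'
          rcases List.mem_cons.mp hm with h | h
          · subst h
            exact Finset.mem_union_right _ (c3 (Finset.mem_insert_self _ _))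
          · exact c9 m h hw'
      · rw [if_neg hg]
        obtain ⟨news', D', c1, c2, c3, c4, c5, c6, c7, c8, c9⟩ :=
          ih queue vs D hcp hDC hnd hq
            (fun m hm => hIn m (List.mem_cons_of_mem _ hm))
            (fun m hm hw' hv' => hRe m (List.mem_cons_of_mem _ hm) hw' hv')
        refine ⟨news', D', c1, c2, c3, c4, c5, c6, c7, c8, ?_⟩
        intro m hm hw'
        rcases List.mem_cons.mp hm with h | h
        · subst h
          have hcontains : PySem.Set.contains vs m = true := by
            cases hvv : PySem.Set.contains vs m
            · exact absurd (by simp only [hw', hvv]; decide) hg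
            · rfl
          rw [coupleB_get rows columns vs (V0 ∪ D) m hcp] at hcontains
          have hmem : m ∈ V0 ∪ D := by simpa using hcontains
          rcases Finset.mem_union.mp hmem with h' | h'
          · exact Finset.mem_union_left _ h'
          · exact Finset.mem_union_right _ (c3 h')
        · exact c9 m h hw'


-- splitting off the popped cell in the bookkeeping sets
theorem pv_pop_set (D : Finset (Int × Int)) (c : Int × Int) (rest : List (Int × Int))
    (hcD : c ∈ D) (hcr : c ∉ rest) :
    D \ rest.toFinset = insert c (D \ (c :: rest).toFinset) := by
  ext z
  by_cases hz : z = c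
  · subst hz
    simp [hcD, hcr]
  · simp [hz]

theorem pv_pop_card (D : Finset (Int × Int)) (c : Int × Int) (rest : List (Int × Int))
    (hcD : c ∈ D) (hcr : c ∉ rest) :
    (D \ rest.toFinset).card = (D \ (c :: rest).toFinset).card + 1 := by
  rw [pv_pop_set D c rest hcD hcr]
  have hnotmem : c ∉ D \ (c :: rest).toFinset := by simp
  rw [Finset.card_insert_of_notMem hnotmem]

-- one-step equations for the DFS loop
theorem dfsA_nil (t : List (List Int)) (rows columns : Int) (fuel : Nat)
    (vm : List (List Bool)) (area : Int) (flag : Bool) :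
    dfsA t rows columns fuel [] vm area flag = (vm, area, flag) := by
  cases fuel <;> rfl

theorem dfsA_step_border (t : List (List Int)) (rows columns : Int) (fuel : Nat)
    (x y : Int) (rest : List (Int × Int)) (vm : List (List Bool)) (area : Int) (flag : Bool)
    (hb : (x == 0 || y == 0 || x == rows - 1 || y == columns - 1) = true) :
    dfsA t rows columns (fuel + 1) ((x, y) :: rest) vm area flag
      = dfsA t rows columns fuel rest (vSet vm x y) (area + 1) false := by
  simp only [dfsA, hb, if_true]

theorem dfsA_step_interior (t : List (List Int)) (rows columns : Int) (fuel : Nat)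
    (x y : Int) (rest : List (Int × Int)) (vm : List (List Bool)) (area : Int) (flag : Bool)
    (hb : (x == 0 || y == 0 || x == rows - 1 || y == columns - 1) = false) :
    dfsA t rows columns (fuel + 1) ((x, y) :: rest) vm area flag
      = dfsA t rows columns fuel
          ((pvAdj (x, y)).foldl
            (fun st (n : Int × Int) => check_push t st.1 st.2 n.1 n.2) (rest, vSet vm x y)).1
          ((pvAdj (x, y)).foldl
            (fun st (n : Int × Int) => check_push t st.1 st.2 n.1 n.2) (rest, vSet vm x y)).2
          (area + 1) flag := by
  simp only [dfsA, hb, Bool.false_eq_true, if_false, pvAdj, List.foldl_cons, List.foldl_nil]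

-- the DFS worklist loop explores exactly the region and counts its cells
theorem dfsA_char (t : List (List Int)) (rows columns : Int) (V0 : Finset (Int × Int))
    (s : Int × Int) (hsR : pvInR rows columns s) :
    ∀ (fuel : Nat) (stack : List (Int × Int)) (vm : List (List Bool)) (D : Finset (Int × Int))
      (area : Int) (flag : Bool),
    coupleA rows columns vm (V0 ∪ D) →
    D ⊆ pvCset t rows columns V0 s →
    stack.Nodup →
    (∀ c ∈ stack, c ∈ D) →
    (∀ c ∈ D, c ∉ stack → pvInt rows columns c →
      ∀ n ∈ pvAdj c, pvCell t n.1 n.2 = 0 → n ∈ V0 ∪ D) →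
    s ∈ D →
    area = ((D \ stack.toFinset).card : Int) →
    flag = decide (∀ c ∈ D \ stack.toFinset, pvInt rows columns c) →
    (pvCset t rows columns V0 s \ D).card + stack.length ≤ fuel →
    coupleA rows columns (dfsA t rows columns fuel stack vm area flag).1
        (V0 ∪ pvCset t rows columns V0 s) ∧
    (dfsA t rows columns fuel stack vm area flag).2.1
      = ((pvCset t rows columns V0 s).card : Int) ∧
    (dfsA t rows columns fuel stack vm area flag).2.2
      = decide (∀ c ∈ pvCset t rows columns V0 s, pvInt rows columns c) := by
  intro fuel
  induction fuel with
  | zero =>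
      intro stack vm D area flag hcp hDC hnd hst hcl hsD harea hflag hfuel
      match stack with
      | [] =>
          have hDC' : pvCset t rows columns V0 s ⊆ D := by
            intro c hc
            exact pvReach_subset t rows columns V0 s D hsD
              (fun c' hc' hint n hn hw => hcl c' hc' (List.not_mem_nil) hint n hn hw) c
              ((mem_pvCset t rows columns V0 s hsR c).mp hc)
          have hDeq : D = pvCset t rows columns V0 s := Finset.Subset.antisymm hDC hDC'
          subst hDeq
          rw [dfsA_nil]
          refine ⟨hcp, ?_, ?_⟩
          · rw [harea]; simp
          · rw [hflag]; simp
      | c :: rest =>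
          exfalso
          simp only [List.length_cons] at hfuel
          omega
  | succ fuel ih =>
      intro stack vm D area flag hcp hDC hnd hst hcl hsD harea hflag hfuel
      match stack with
      | [] =>
          have hDC' : pvCset t rows columns V0 s ⊆ D := by
            intro c hc
            exact pvReach_subset t rows columns V0 s D hsD
              (fun c' hc' hint n hn hw => hcl c' hc' (List.not_mem_nil) hint n hn hw) c
              ((mem_pvCset t rows columns V0 s hsR c).mp hc)
          have hDeq : D = pvCset t rows columns V0 s := Finset.Subset.antisymm hDC hDC'
          subst hDeq
          rw [dfsA_nil]
          refine ⟨hcp, ?_, ?_⟩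
          · rw [harea]; simp
          · rw [hflag]; simp
      | (x, y) :: rest =>
          have hcD : (x, y) ∈ D := hst _ List.mem_cons_self
          have hcInR : pvInR rows columns (x, y) :=
            pvCset_inR t rows columns V0 s _ (hDC hcD)
          have hcr : (x, y) ∉ rest := (List.nodup_cons.mp hnd).1
          have hndr : rest.Nodup := (List.nodup_cons.mp hnd).2
          have hcp1 : coupleA rows columns (vSet vm x y) (V0 ∪ D) :=
            coupleA_set_mem rows columns vm (V0 ∪ D) (x, y) hcp hcInR
              (Finset.mem_union_right _ hcD)
          have harea1 : area + 1 = ((D \ rest.toFinset).card : Int) := by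
            rw [harea, pv_pop_card D (x, y) rest hcD hcr]
            push_cast
            ring
          have hbt := borderTest rows columns (x, y) hcInR
          cases hInt : decide (pvInt rows columns (x, y)) with
          | false =>
              have hIntP : ¬ pvInt rows columns (x, y) := of_decide_eq_false hInt
              have hb : (x == 0 || y == 0 || x == rows - 1 || y == columns - 1) = true := by
                rw [hbt, hInt]; rfl
              rw [dfsA_step_border t rows columns fuel x y rest vm area flag hb]
              refine ih rest (vSet vm x y) D (area + 1) false hcp1 hDC hndr
                (fun c hc => hst c (List.mem_cons_of_mem _ hc)) ?_ hsD harea1 ?_ ?_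
              · intro c hc hcnr hint n hn hw
                have hcs : c ∉ (x, y) :: rest := by
                  intro h
                  rcases List.mem_cons.mp h with h' | h'
                  · subst h'; exact hIntP hint
                  · exact hcnr h'
                exact hcl c hc hcs hint n hn hw
              · symm
                apply decide_eq_false
                intro hall
                exact hIntP (hall (x, y) (by
                  rw [pv_pop_set D (x, y) rest hcD hcr]
                  exact Finset.mem_insert_self _ _))
              · simp only [List.length_cons] at hfuel
                omega
          | true =>
              have hIntP : pvInt rows columns (x, y) := of_decide_eq_true hInt
              have hb : (x == 0 || y == 0 || x == rows - 1 || y == columns - 1) = false := by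
                rw [hbt, hInt]; rfl
              rw [dfsA_step_interior t rows columns fuel x y rest vm area flag hb]
              obtain ⟨D', c1, c2, c3, c4, c5, c6, c7, c8, c9, c10, c11⟩ :=
                pushA_fold t rows columns V0 s hsR (pvAdj (x, y)) rest (vSet vm x y) D hcp1 hDC
                  hndr (fun c hc => hst c (List.mem_cons_of_mem _ hc))
                  (fun n hn => pvAdj_inR rows columns _ n hIntP hn)
                  (fun n hn hw hv =>
                    pvReach.step ((mem_pvCset t rows columns V0 s hsR _).mp (hDC hcD)) hIntP hn hw hv)
              refine ih _ _ D' (area + 1) flag c1 c3 c4 c5 ?_ (c2 hsD) ?_ ?_ ?_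
              · -- closure for the new state
                intro c hc hcns hint n hn hw
                by_cases hcD' : c ∈ D
                · by_cases hcc : c = (x, y)
                  · subst hcc
                    exact c11 n hn hw
                  · have hcnr : c ∉ rest := fun h => hcns (c6 c h)
                    have : c ∉ (x, y) :: rest := by
                      intro h
                      rcases List.mem_cons.mp h with h' | h'
                      · exact hcc h'
                      · exact hcnr h'
                    have := hcl c hcD' this hint n hn hw
                    rcases Finset.mem_union.mp this with h' | h'
                    · exact Finset.mem_union_left _ h'
                    · exact Finset.mem_union_right _ (c2 h')
                · exact absurd (c7 c hc hcD') hcns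
              · rw [harea1, c9]
              · rw [hflag]
                apply decide_eq_decide.mpr
                rw [c9, pv_pop_set D (x, y) rest hcD hcr]
                rw [Finset.forall_mem_insert]
                constructor
                · intro h
                  exact ⟨hIntP, h⟩
                · intro h
                  exact h.2
              · simp only [List.length_cons] at hfuel
                omega

-- one-step equations for the BFS loop
theorem bfsB_term (t : List (List Int)) (rows columns : Int) (fuel : Nat)
    (queue : List (Int × Int)) (head : Nat) (vs : PySem.Set (Int × Int)) (area : Int)
    (flag : Bool) (h : ¬ head < queue.length) :
    bfsB t rows columns fuel queue head vs area flag = (vs, area, flag) := by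
  cases fuel with
  | zero => rfl
  | succ fuel => simp only [bfsB, dif_neg h]

theorem bfsB_step_border (t : List (List Int)) (rows columns : Int) (fuel : Nat)
    (queue : List (Int × Int)) (head : Nat) (vs : PySem.Set (Int × Int)) (area : Int)
    (flag : Bool) (h : head < queue.length)
    (hb : ((queue[head]'h).1 == 0 || (queue[head]'h).2 == 0 ||
        (queue[head]'h).1 == rows - 1 || (queue[head]'h).2 == columns - 1) = true) :
    bfsB t rows columns (fuel + 1) queue head vs area flag
      = bfsB t rows columns fuel queue (head + 1) vs (area + 1) false := by
  simp only [bfsB, dif_pos h, hb, if_true]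

theorem bfsB_step_interior (t : List (List Int)) (rows columns : Int) (fuel : Nat)
    (queue : List (Int × Int)) (head : Nat) (vs : PySem.Set (Int × Int)) (area : Int)
    (flag : Bool) (h : head < queue.length)
    (hb : ((queue[head]'h).1 == 0 || (queue[head]'h).2 == 0 ||
        (queue[head]'h).1 == rows - 1 || (queue[head]'h).2 == columns - 1) = false) :
    bfsB t rows columns (fuel + 1) queue head vs area flag
      = bfsB t rows columns fuel
          ((pvAdj (queue[head]'h)).foldl
            (fun (st : List (Int × Int) × PySem.Set (Int × Int)) n =>
              if pvCell t n.1 n.2 == 0 && !(PySem.Set.contains st.2 n) then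
                (st.1 ++ [n], PySem.Set.add st.2 n)
              else st) (queue, vs)).1 (head + 1)
          ((pvAdj (queue[head]'h)).foldl
            (fun (st : List (Int × Int) × PySem.Set (Int × Int)) n =>
              if pvCell t n.1 n.2 == 0 && !(PySem.Set.contains st.2 n) then
                (st.1 ++ [n], PySem.Set.add st.2 n)
              else st) (queue, vs)).2 (area + 1) flag := by
  simp only [bfsB, dif_pos h, hb, Bool.false_eq_true, if_false, pvAdj, List.foldl_cons,
    List.foldl_nil]

-- the BFS worklist loop explores exactly the region and counts its cells
theorem bfsB_char (t : List (List Int)) (rows columns : Int) (V0 : Finset (Int × Int))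
    (s : Int × Int) (hsR : pvInR rows columns s) :
    ∀ (fuel : Nat) (queue : List (Int × Int)) (head : Nat) (vs : PySem.Set (Int × Int))
      (D : Finset (Int × Int)) (area : Int) (flag : Bool),
    coupleB rows columns vs (V0 ∪ D) →
    D ⊆ pvCset t rows columns V0 s →
    queue.Nodup →
    (∀ c ∈ queue, c ∈ D) →
    (∀ c ∈ D, c ∉ queue.drop head → pvInt rows columns c →
      ∀ n ∈ pvAdj c, pvCell t n.1 n.2 = 0 → n ∈ V0 ∪ D) →
    s ∈ D →
    area = ((D \ (queue.drop head).toFinset).card : Int) →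
    flag = decide (∀ c ∈ D \ (queue.drop head).toFinset, pvInt rows columns c) →
    (pvCset t rows columns V0 s \ D).card + (queue.length - head) ≤ fuel →
    coupleB rows columns (bfsB t rows columns fuel queue head vs area flag).1
        (V0 ∪ pvCset t rows columns V0 s) ∧
    (bfsB t rows columns fuel queue head vs area flag).2.1
      = ((pvCset t rows columns V0 s).card : Int) ∧
    (bfsB t rows columns fuel queue head vs area flag).2.2
      = decide (∀ c ∈ pvCset t rows columns V0 s, pvInt rows columns c) := by
  intro fuel
  induction fuel with
  | zero =>
      intro queue head vs D area flag hcp hDC hnd hq hcl hsD harea hflag hfuel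
      have hterm : ¬ head < queue.length := by omega
      have hdrop : queue.drop head = [] := List.drop_eq_nil_of_le (by omega)
      have hDC' : pvCset t rows columns V0 s ⊆ D := by
        intro c hc
        exact pvReach_subset t rows columns V0 s D hsD
          (fun c' hc' hint n hn hw => hcl c' hc' (by rw [hdrop]; exact List.not_mem_nil) hint n hn hw) c
          ((mem_pvCset t rows columns V0 s hsR c).mp hc)
      have hDeq : D = pvCset t rows columns V0 s := Finset.Subset.antisymm hDC hDC'
      subst hDeq
      rw [bfsB_term t rows columns 0 queue head vs area flag hterm]
      refine ⟨hcp, ?_, ?_⟩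
      · rw [harea, hdrop]; simp
      · rw [hflag, hdrop]; simp
  | succ fuel ih =>
      intro queue head vs D area flag hcp hDC hnd hq hcl hsD harea hflag hfuel
      by_cases h : head < queue.length
      · have hdrop : queue.drop head = queue[head] :: queue.drop (head + 1) :=
          List.drop_eq_getElem_cons h
        set c : Int × Int := queue[head]'h with hc_def
        have hcD : c ∈ D := hq c (List.getElem_mem h)
        have hcInR : pvInR rows columns c := pvCset_inR t rows columns V0 s _ (hDC hcD)
        have hpnd : (queue.drop head).Nodup := hnd.sublist (List.drop_sublist _ _)
        have hcr : c ∉ queue.drop (head + 1) := by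
          rw [hdrop] at hpnd
          exact (List.nodup_cons.mp hpnd).1
        have harea1 : area + 1 = ((D \ (queue.drop (head + 1)).toFinset).card : Int) := by
          rw [harea]
          have := pv_pop_card D c (queue.drop (head + 1)) hcD hcr
          rw [hdrop]
          rw [show (D \ (queue.drop (head+1)).toFinset).card
              = (D \ (c :: queue.drop (head+1)).toFinset).card + 1 from this]
          push_cast
          ring
        have hbt := borderTest rows columns c hcInR
        cases hInt : decide (pvInt rows columns c) with
        | false =>
            have hIntP : ¬ pvInt rows columns c := of_decide_eq_false hInt
            have hb : (c.1 == 0 || c.2 == 0 || c.1 == rows - 1 || c.2 == columns - 1) = true := by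
              rw [hbt, hInt]; rfl
            rw [bfsB_step_border t rows columns fuel queue head vs area flag h hb]
            refine ih queue (head + 1) vs D (area + 1) false hcp hDC hnd hq ?_ hsD harea1 ?_ ?_
            · intro c' hc' hcnr hint n hn hw
              have hcs : c' ∉ queue.drop head := by
                rw [hdrop]
                intro hmem
                rcases List.mem_cons.mp hmem with h' | h'
                · subst h'; exact hIntP hint
                · exact hcnr h'
              exact hcl c' hc' hcs hint n hn hw
            · symm
              apply decide_eq_false
              intro hall
              apply hIntP
              apply hall c
              rw [hdrop] at harea
              rw [pv_pop_set D c (queue.drop (head + 1)) hcD hcr]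
              exact Finset.mem_insert_self _ _
            · omega
        | true =>
            have hIntP : pvInt rows columns c := of_decide_eq_true hInt
            have hb : (c.1 == 0 || c.2 == 0 || c.1 == rows - 1 || c.2 == columns - 1) = false := by
              rw [hbt, hInt]; rfl
            rw [bfsB_step_interior t rows columns fuel queue head vs area flag h hb]
            obtain ⟨news, D', c1, c2, c3, c4, c5, c6, c7, c8, c9⟩ :=
              pushB_fold t rows columns V0 s hsR (pvAdj c) queue vs D hcp hDC hnd hq
                (fun n hn => pvAdj_inR rows columns _ n hIntP hn)
                (fun n hn hw hv =>
                  pvReach.step ((mem_pvCset t rows columns V0 s hsR _).mp (hDC hcD)) hIntP hn hw hv)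
            have hnewsD : ∀ z ∈ news, z ∉ D := fun z hz => (c6 z hz).2
            have hq' : ∀ z ∈ (queue ++ news), z ∈ D' := by
              intro z hz
              rcases List.mem_append.mp hz with h' | h'
              · exact c3 (hq z h')
              · exact (c6 z h').1
            have hnd' : (queue ++ news).Nodup := by
              apply List.Nodup.append hnd c5
              intro a ha ha'
              exact hnewsD a ha' (hq a ha)
            have hdrop' : (queue ++ news).drop (head + 1) = queue.drop (head + 1) ++ news :=
              List.drop_append_of_le_length (by omega)
            have hsetEq : D' \ ((queue ++ news).drop (head + 1)).toFinset
                = D \ (queue.drop (head + 1)).toFinset := by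
              rw [hdrop']
              ext z
              simp only [Finset.mem_sdiff, List.toFinset_append, Finset.mem_union,
                List.mem_toFinset]
              constructor
              · rintro ⟨h1, h2⟩
                have hzD : z ∈ D := by
                  by_contra hzD
                  exact h2 (Or.inr (c7 z h1 hzD))
                exact ⟨hzD, fun h' => h2 (Or.inl h')⟩
              · rintro ⟨h1, h2⟩
                refine ⟨c3 h1, ?_⟩
                rintro (h' | h')
                · exact h2 h'
                · exact hnewsD z h' h1
            rw [c1]
            refine ih (queue ++ news) (head + 1) _ D' (area + 1) flag c2 c4 hnd' hq' ?_
              (c3 hsD) ?_ ?_ ?_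
            · -- closure in the new state
              intro c' hc' hcns hint n hn hw
              rw [hdrop'] at hcns
              by_cases hcD'' : c' ∈ D
              · by_cases hcc : c' = c
                · subst hcc
                  exact c9 n hn hw
                · have hcnr : c' ∉ queue.drop head := by
                    rw [hdrop]
                    intro hmem
                    rcases List.mem_cons.mp hmem with h' | h'
                    · exact hcc h'
                    · exact hcns (List.mem_append.mpr (Or.inl h'))
                  have := hcl c' hcD'' hcnr hint n hn hw
                  rcases Finset.mem_union.mp this with h' | h'
                  · exact Finset.mem_union_left _ h'
                  · exact Finset.mem_union_right _ (c3 h')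
              · exact absurd (List.mem_append.mpr (Or.inr (c7 c' hc' hcD''))) hcns
            · rw [harea1, hsetEq]
            · rw [hflag]
              apply decide_eq_decide.mpr
              rw [hsetEq, hdrop, pv_pop_set D c (queue.drop (head + 1)) hcD hcr,
                Finset.forall_mem_insert]
              constructor
              · intro hh
                exact ⟨hIntP, hh⟩
              · intro hh
                exact hh.2
            · have hlen : (queue ++ news).length = queue.length + news.length := by
                simp
              omega
      · have hdrop : queue.drop head = [] := List.drop_eq_nil_of_le (by omega)
        have hDC' : pvCset t rows columns V0 s ⊆ D := by
          intro c hc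
          exact pvReach_subset t rows columns V0 s D hsD
            (fun c' hc' hint n hn hw => hcl c' hc' (by rw [hdrop]; exact List.not_mem_nil) hint n hn hw) c
            ((mem_pvCset t rows columns V0 s hsR c).mp hc)
        have hDeq : D = pvCset t rows columns V0 s := Finset.Subset.antisymm hDC hDC'
        subst hDeq
        rw [bfsB_term t rows columns (fuel + 1) queue head vs area flag h]
        refine ⟨hcp, ?_, ?_⟩
        · rw [harea, hdrop]; simp
        · rw [hflag, hdrop]; simp


theorem pvInt_inR (rows columns : Int) (c : Int × Int) (h : pvInt rows columns c) :
    pvInR rows columns c := by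
  obtain ⟨h1, h2, h3, h4⟩ := h
  exact ⟨by omega, by omega, by omega, by omega⟩

-- A's flood call on a fresh interior start cell
theorem dfsA_run (t : List (List Int)) (rows columns : Int) (V0 : Finset (Int × Int))
    (vm : List (List Bool)) (s : Int × Int)
    (hcp : coupleA rows columns vm V0) (hsInt : pvInt rows columns s) (hs0 : s ∉ V0) :
    coupleA rows columns
      (dfsA t rows columns (rows.toNat * columns.toNat + 1) [s] vm 0 true).1
      (V0 ∪ pvCset t rows columns V0 s) ∧
    (dfsA t rows columns (rows.toNat * columns.toNat + 1) [s] vm 0 true).2.1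
      = ((pvCset t rows columns V0 s).card : Int) ∧
    (dfsA t rows columns (rows.toNat * columns.toNat + 1) [s] vm 0 true).2.2
      = decide (∀ c ∈ pvCset t rows columns V0 s, pvInt rows columns c) := by
  have hsR : pvInR rows columns s := pvInt_inR rows columns s hsInt
  have hsC : s ∈ pvCset t rows columns V0 s :=
    (mem_pvCset t rows columns V0 s hsR s).mpr pvReach.base
  obtain ⟨x, y⟩ := s
  have hb : (x == 0 || y == 0 || x == rows - 1 || y == columns - 1) = false := by
    rw [borderTest rows columns (x, y) hsR]
    simp only [decide_eq_true hsInt]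
    rfl
  rw [dfsA_step_interior t rows columns (rows.toNat * columns.toNat) x y [] vm 0 true hb]
  have hcp1 : coupleA rows columns (vSet vm x y) (V0 ∪ {(x, y)}) := by
    have := coupleA_insert rows columns vm V0 (x, y) hcp hsR
    rwa [Finset.union_singleton]
  obtain ⟨D', c1, c2, c3, c4, c5, c6, c7, c8, c9, c10, c11⟩ :=
    pushA_fold t rows columns V0 (x, y) hsR (pvAdj (x, y)) [] (vSet vm x y) {(x, y)} hcp1
      (Finset.singleton_subset_iff.mpr hsC) List.nodup_nil
      (fun c hc => absurd hc (List.not_mem_nil))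
      (fun n hn => pvAdj_inR rows columns _ n hsInt hn)
      (fun n hn hw hv => pvReach.step pvReach.base hsInt hn hw hv)
  have hcard1 : (pvCset t rows columns V0 (x, y) \ {(x, y)}).card
      = (pvCset t rows columns V0 (x, y)).card - 1 := by
    rw [Finset.card_sdiff, Finset.singleton_inter_of_mem hsC]
    simp
  have hCpos : 0 < (pvCset t rows columns V0 (x, y)).card := Finset.card_pos.mpr ⟨_, hsC⟩
  have hCle := pvCset_card_le t rows columns V0 (x, y)
  refine dfsA_char t rows columns V0 (x, y) hsR (rows.toNat * columns.toNat) _ _ D' (0 + 1) true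
    c1 c3 c4 c5 ?_ (c2 (Finset.mem_singleton_self _)) ?_ ?_ ?_
  · intro c hc hcns hint n hn hw
    by_cases hcs : c = (x, y)
    · subst hcs
      exact c11 n hn hw
    · exact absurd (c7 c hc (by simp [hcs])) hcns
  · rw [c9]
    simp
  · symm
    apply decide_eq_true
    intro c hc
    rw [c9] at hc
    simp only [List.toFinset_nil, Finset.sdiff_empty, Finset.mem_singleton] at hc
    subst hc
    exact hsInt
  · have h10 := c10
    simp only [List.length_nil] at h10
    omega

-- B's flood call on a fresh interior start cell
theorem bfsB_run (t : List (List Int)) (rows columns : Int) (V0 : Finset (Int × Int))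
    (vs : PySem.Set (Int × Int)) (s : Int × Int)
    (hcp : coupleB rows columns vs V0) (hsInt : pvInt rows columns s) (hs0 : s ∉ V0) :
    coupleB rows columns
      (bfsB t rows columns (rows.toNat * columns.toNat + 1) [s] 0 (PySem.Set.add vs s) 0 true).1
      (V0 ∪ pvCset t rows columns V0 s) ∧
    (bfsB t rows columns (rows.toNat * columns.toNat + 1) [s] 0 (PySem.Set.add vs s) 0 true).2.1
      = ((pvCset t rows columns V0 s).card : Int) ∧
    (bfsB t rows columns (rows.toNat * columns.toNat + 1) [s] 0 (PySem.Set.add vs s) 0 true).2.2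
      = decide (∀ c ∈ pvCset t rows columns V0 s, pvInt rows columns c) := by
  have hsR : pvInR rows columns s := pvInt_inR rows columns s hsInt
  have hsC : s ∈ pvCset t rows columns V0 s :=
    (mem_pvCset t rows columns V0 s hsR s).mpr pvReach.base
  have hcp1 : coupleB rows columns (PySem.Set.add vs s) (V0 ∪ {s}) := by
    have := coupleB_insert rows columns vs V0 s hcp hsR
    rwa [Finset.union_singleton]
  have hcard1 : (pvCset t rows columns V0 s \ {s}).card
      = (pvCset t rows columns V0 s).card - 1 := by
    rw [Finset.card_sdiff, Finset.singleton_inter_of_mem hsC]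
    simp
  have hCpos : 0 < (pvCset t rows columns V0 s).card := Finset.card_pos.mpr ⟨_, hsC⟩
  have hCle := pvCset_card_le t rows columns V0 s
  refine bfsB_char t rows columns V0 s hsR (rows.toNat * columns.toNat + 1) [s] 0
    (PySem.Set.add vs s) {s} 0 true hcp1 (Finset.singleton_subset_iff.mpr hsC)
    (List.nodup_singleton s) (by intro c hc; simpa using hc) ?_
    (Finset.mem_singleton_self _) ?_ ?_ ?_
  · intro c hc hcns hint n hn hw
    exfalso
    apply hcns
    simp only [Finset.mem_singleton] at hc
    subst hc
    simp [List.drop]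
  · simp
  · simp
  · simp only [List.length_singleton]
    omega


-- the two scans, cell by cell
def cellStepA (t : List (List Int)) (rows columns : Int) (fuel : Nat)
    (acc : List (List Bool) × List Int) (i k : Int) : List (List Bool) × List Int :=
  if vGet acc.1 i k || pvCell t i k == 1 then acc
  else if (dfsA t rows columns fuel [(i, k)] acc.1 0 true).2.2 then
    ((dfsA t rows columns fuel [(i, k)] acc.1 0 true).1,
      acc.2 ++ [(dfsA t rows columns fuel [(i, k)] acc.1 0 true).2.1])
  else ((dfsA t rows columns fuel [(i, k)] acc.1 0 true).1, acc.2)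

def cellStepB (t : List (List Int)) (rows columns : Int) (fuel : Nat)
    (acc : PySem.Set (Int × Int) × List Int) (i k : Int) : PySem.Set (Int × Int) × List Int :=
  if PySem.Set.contains acc.1 (i, k) || pvCell t i k == 1 then acc
  else if (bfsB t rows columns fuel [(i, k)] 0 (PySem.Set.add acc.1 (i, k)) 0 true).2.2 then
    ((bfsB t rows columns fuel [(i, k)] 0 (PySem.Set.add acc.1 (i, k)) 0 true).1,
      acc.2 ++ [(bfsB t rows columns fuel [(i, k)] 0 (PySem.Set.add acc.1 (i, k)) 0 true).2.1])
  else ((bfsB t rows columns fuel [(i, k)] 0 (PySem.Set.add acc.1 (i, k)) 0 true).1, acc.2)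

-- coupling of the paired scan accumulators
def pvRelP (rows columns : Int) (a : List (List Bool) × List Int)
    (b : PySem.Set (Int × Int) × List Int) : Prop :=
  ∃ V : Finset (Int × Int),
    coupleA rows columns a.1 V ∧ coupleB rows columns b.1 V ∧ a.2 = b.2

theorem cellStep_lockstep (t : List (List Int)) (rows columns : Int)
    (a : List (List Bool) × List Int) (b : PySem.Set (Int × Int) × List Int) (i k : Int)
    (hab : pvRelP rows columns a b) (hint : pvInt rows columns (i, k)) :
    pvRelP rows columns (cellStepA t rows columns (rows.toNat * columns.toNat + 1) a i k)
      (cellStepB t rows columns (rows.toNat * columns.toNat + 1) b i k) := by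
  obtain ⟨V, hA, hB, hans⟩ := hab
  have hinR : pvInR rows columns (i, k) := pvInt_inR rows columns (i, k) hint
  have hgA : vGet a.1 i k = decide ((i, k) ∈ V) := coupleA_get rows columns a.1 V (i, k) hA hinR
  have hgB : PySem.Set.contains b.1 (i, k) = decide ((i, k) ∈ V) :=
    coupleB_get rows columns b.1 V (i, k) hB
  unfold cellStepA cellStepB
  rw [hgA, hgB]
  by_cases hg : (decide ((i, k) ∈ V) || pvCell t i k == 1) = true
  · rw [if_pos hg, if_pos hg]
    exact ⟨V, hA, hB, hans⟩
  · rw [if_neg hg, if_neg hg]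
    have hs0 : (i, k) ∉ V := by
      intro h
      exact hg (by simp [h])
    obtain ⟨a1, a2, a3⟩ := dfsA_run t rows columns V a.1 (i, k) hA hint hs0
    obtain ⟨b1, b2, b3⟩ := bfsB_run t rows columns V b.1 (i, k) hB hint hs0
    rw [a3, b3, a2, b2]
    by_cases hf : (decide (∀ c ∈ pvCset t rows columns V (i, k), pvInt rows columns c)) = true
    · rw [if_pos hf, if_pos hf]
      exact ⟨V ∪ pvCset t rows columns V (i, k), a1, b1, by rw [hans]⟩
    · rw [if_neg hf, if_neg hf]
      exact ⟨V ∪ pvCset t rows columns V (i, k), a1, b1, hans⟩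

theorem inner_lockstep (t : List (List Int)) (rows columns : Int) (i : Int)
    (hi : 1 ≤ i ∧ i < rows - 1) :
    ∀ (ks : List Int), (∀ k ∈ ks, 1 ≤ k ∧ k < columns - 1) →
    ∀ (a : List (List Bool) × List Int) (b : PySem.Set (Int × Int) × List Int),
    pvRelP rows columns a b →
    pvRelP rows columns
      (ks.foldl (fun acc k => cellStepA t rows columns (rows.toNat * columns.toNat + 1) acc i k) a)
      (ks.foldl (fun acc k => cellStepB t rows columns (rows.toNat * columns.toNat + 1) acc i k) b) := by
  intro ks
  induction ks with
  | nil =>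
      intro _ a b hab
      simpa using hab
  | cons k ks ihk =>
      intro hks a b hab
      simp only [List.foldl_cons]
      exact ihk (fun q hq => hks q (List.mem_cons_of_mem _ hq)) _ _
        (cellStep_lockstep t rows columns a b i k hab
          ⟨by have := hi.1; omega, by have := hi.2; omega,
           by have := (hks k List.mem_cons_self).1; omega,
           by have := (hks k List.mem_cons_self).2; omega⟩)

theorem scan_lockstep (t : List (List Int)) (rows columns : Int)
    (ks : List Int) (hks : ∀ k ∈ ks, 1 ≤ k ∧ k < columns - 1) :
    ∀ (is : List Int), (∀ i ∈ is, 1 ≤ i ∧ i < rows - 1) →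
    ∀ (a : List (List Bool) × List Int) (b : PySem.Set (Int × Int) × List Int),
    pvRelP rows columns a b →
    pvRelP rows columns
      (is.foldl (fun acc i =>
        ks.foldl (fun acc k => cellStepA t rows columns (rows.toNat * columns.toNat + 1) acc i k) acc) a)
      (is.foldl (fun acc i =>
        ks.foldl (fun acc k => cellStepB t rows columns (rows.toNat * columns.toNat + 1) acc i k) acc) b) := by
  intro is
  induction is with
  | nil =>
      intro _ a b hab
      simpa using hab
  | cons i is ihs =>
      intro his a b hab
      simp only [List.foldl_cons]
      exact ihs (fun q hq => his q (List.mem_cons_of_mem _ hq)) _ _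
        (inner_lockstep t rows columns i (his i List.mem_cons_self) ks hks _ _ hab)

-- index bookkeeping: A scans range(rows-2) at i+1, B scans range(1, rows-1) at i
theorem foldl_pyRange_shift {T : Type} (f : T → Int → T) (a b : Int) (init : T) :
    (PySem.List.pyRange a b 1).foldl (fun acc i => f acc (i + 1)) init
      = (PySem.List.pyRange (a + 1) (b + 1) 1).foldl f init := by
  rw [PySem.List.pyRange_one a b, PySem.List.pyRange_one (a + 1) (b + 1)]
  have h : (b + 1 - (a + 1)).toNat = (b - a).toNat := by omega
  rw [h, List.foldl_map, List.foldl_map]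
  apply List.foldl_ext
  intro acc k _
  congr 1
  ring

theorem foldl_pyRange_shift2 {T : Type} (f : T → Int → T) (b : Int) (init : T) :
    (PySem.List.pyRange 0 (b - 2) 1).foldl (fun acc i => f acc (i + 1)) init
      = (PySem.List.pyRange 1 (b - 1) 1).foldl f init := by
  have h := foldl_pyRange_shift f 0 (b - 2) init
  rw [show (0 : Int) + 1 = 1 from by norm_num, show b - 2 + 1 = b - 1 from by ring] at h
  exact h

theorem buildRows_eq (rows : Int) {T : Type} (r : T) :
    (PySem.List.pyRange 0 rows 1).foldl (fun v _ => v ++ [r]) []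
      = List.replicate rows.toNat r := by
  rw [show (fun (v : List T) (_ : Int) => v ++ [r]) = (fun v x => v ++ [(fun _ => r) x]) from rfl]
  rw [PySem.List.foldl_append_singleton_eq_map]
  rw [List.nil_append, List.map_const', PySem.List.length_pyRange_one]
  simp

theorem mapRows_eq (rows : Int) {T : Type} (r : T) :
    (PySem.List.pyRange 0 rows 1).map (fun _ => r) = List.replicate rows.toNat r := by
  rw [List.map_const', PySem.List.length_pyRange_one]
  simp

theorem coupleA_init (rows columns : Int) :
    coupleA rows columns (List.replicate rows.toNat (List.replicate columns.toNat false)) ∅ := by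
  refine ⟨⟨by simp, ?_⟩, ?_, ?_⟩
  · intro r hr
    rw [List.eq_of_mem_replicate hr]
    simp
  · intro c hc
    obtain ⟨h1, h2, h3, h4⟩ := hc
    rw [vGet_repl rows columns c.1 c.2 h1 h2 h3 h4]
    simp
  · intro c hc
    simp at hc

theorem coupleB_init (rows columns : Int) :
    coupleB rows columns PySem.Set.empty ∅ := by
  refine ⟨?_, ?_⟩
  · intro c
    simp [PySem.Set.empty]
  · intro c hc
    simp at hc

-- the scans and the shared final min/max step
def scanA (t : List (List Int)) (rows columns : Int) (fuel : Nat) (v0 : List (List Bool)) : List Int :=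
  ((PySem.List.pyRange 0 (rows - 2) 1).foldl
    (fun (acc : List (List Bool) × List Int) i =>
      (PySem.List.pyRange 0 (columns - 2) 1).foldl
        (fun acc k => cellStepA t rows columns fuel acc (i + 1) (k + 1)) acc)
    (v0, ([] : List Int))).2

def scanB (t : List (List Int)) (rows columns : Int) (fuel : Nat) : List Int :=
  ((PySem.List.pyRange 1 (rows - 1) 1).foldl
    (fun (acc : PySem.Set (Int × Int) × List Int) i =>
      (PySem.List.pyRange 1 (columns - 1) 1).foldl
        (fun acc k => cellStepB t rows columns fuel acc i k) acc)
    (PySem.Set.empty, ([] : List Int))).2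

def pvFinish (ans : List Int) : List Int :=
  if ans.isEmpty then [-1, -1]
  else [(PySem.List.min? ans (fun v => v)).getD 0, (PySem.List.max? ans (fun v => v)).getD 0]

theorem scan_eq (t : List (List Int)) (rows columns : Int) :
    scanA t rows columns (rows.toNat * columns.toNat + 1)
        (List.replicate rows.toNat (List.replicate columns.toNat false))
      = scanB t rows columns (rows.toNat * columns.toNat + 1) := by
  unfold scanA scanB
  have e1 := foldl_pyRange_shift2
    (fun (acc : List (List Bool) × List Int) (i : Int) =>
      (PySem.List.pyRange 0 (columns - 2) 1).foldl
        (fun acc k => cellStepA t rows columns (rows.toNat * columns.toNat + 1) acc i (k + 1)) acc)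
    rows
    (List.replicate rows.toNat (List.replicate columns.toNat false), ([] : List Int))
  have e2 : ((PySem.List.pyRange 1 (rows - 1) 1).foldl
      (fun (acc : List (List Bool) × List Int) i =>
        (PySem.List.pyRange 0 (columns - 2) 1).foldl
          (fun acc k => cellStepA t rows columns (rows.toNat * columns.toNat + 1) acc i (k + 1)) acc)
      (List.replicate rows.toNat (List.replicate columns.toNat false), ([] : List Int)))
      = ((PySem.List.pyRange 1 (rows - 1) 1).foldl
      (fun (acc : List (List Bool) × List Int) i =>
        (PySem.List.pyRange 1 (columns - 1) 1).foldl
          (fun acc k => cellStepA t rows columns (rows.toNat * columns.toNat + 1) acc i k) acc)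
      (List.replicate rows.toNat (List.replicate columns.toNat false), ([] : List Int))) :=
    List.foldl_ext _ _ _
      (fun acc i _ => foldl_pyRange_shift2
        (fun acc k => cellStepA t rows columns (rows.toNat * columns.toNat + 1) acc i k) columns acc)
  have hrel := scan_lockstep t rows columns (PySem.List.pyRange 1 (columns - 1) 1)
    (by intro k hk; rw [PySem.List.mem_pyRange_one] at hk; omega)
    (PySem.List.pyRange 1 (rows - 1) 1)
    (by intro i hi; rw [PySem.List.mem_pyRange_one] at hi; omega)
    (List.replicate rows.toNat (List.replicate columns.toNat false), ([] : List Int))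
    (PySem.Set.empty, ([] : List Int))
    ⟨∅, coupleA_init rows columns, coupleB_init rows columns, rfl⟩
  obtain ⟨V, _, _, hans⟩ := hrel
  exact (congrArg Prod.snd (e1.trans e2)).trans hans

-- ===== VERDICT (by name: the statement is the Claim_ definition above) =====
theorem solution_spec : Claim_equal_solution := by
  intro rows columns lands _dom _pre
  show solution rows columns lands = solution_alt rows columns lands
  have hA : solution rows columns lands
      = pvFinish (scanA (markLands (List.replicate rows.toNat (List.replicate columns.toNat 0)) lands)
          rows columns (rows.toNat * columns.toNat + 1)
          (List.replicate rows.toNat (List.replicate columns.toNat false))) := by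
    have h0 : solution rows columns lands
        = pvFinish (scanA (markLands ((PySem.List.pyRange 0 rows 1).foldl
              (fun t _ => t ++ [List.replicate columns.toNat (0 : Int)]) []) lands)
            rows columns (rows.toNat * columns.toNat + 1)
            ((PySem.List.pyRange 0 rows 1).foldl
              (fun v _ => v ++ [List.replicate columns.toNat false]) [])) := rfl
    rw [h0, buildRows_eq, buildRows_eq]
  have hB : solution_alt rows columns lands
      = pvFinish (scanB (markLands (List.replicate rows.toNat (List.replicate columns.toNat 0)) lands)
          rows columns (rows.toNat * columns.toNat + 1)) := by
    have h0 : solution_alt rows columns lands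
        = pvFinish (scanB (markLands ((PySem.List.pyRange 0 rows 1).map
              (fun _ => List.replicate columns.toNat (0 : Int))) lands)
            rows columns (rows.toNat * columns.toNat + 1)) := rfl
    rw [h0, mapRows_eq]
  rw [hA, hB, scan_eq]
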